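-- pv_equiv track=rewrite | github.com/saadxxx847-ai/Graduation-Project | main.py | resolve_temperature_feature_index
-- ===== SOURCE A (Python) =====
-- def resolve_temperature_feature_index(feat_names: list[str]) -> int:
--     """单变量气温时恒为 0；多变量时解析气温列索引。"""
--     if len(feat_names) == 1:
--         return 0
--     for key in ("T (degC)", "T(degC)", "temp", "temperature"):
--         for i, name in enumerate(feat_names):
--             if name.strip().lower() == key.lower():
--                 return i
--     for i, name in enumerate(feat_names):
--         n = name.lower()
--         if "degc" in n and "tlog" not in n and "tpot" not in n and n.strip().startswith("t"):
--             return i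
--     return min(1, len(feat_names) - 1)
-- ===== SOURCE B (Python) =====
-- def _rank(name):
--     """Priority rank of a column name: 0-3 exact keys, 4 heuristic, None otherwise."""
--     s = name.strip().lower()
--     if s == "t (degc)":
--         return 0
--     if s == "t(degc)":
--         return 1
--     if s == "temp":
--         return 2
--     if s == "temperature":
--         return 3
--     n = name.lower()
--     if "degc" in n and "tlog" not in n and "tpot" not in n and n.strip().startswith("t"):
--         return 4
--     return None
--
-- def resolve_temperature_feature_index(feat_names: list[str]) -> int:
--     best = None  # (rank, index); lower rank wins, earlier index wins ties
--     for i, name in enumerate(feat_names):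
--         r = _rank(name)
--         if r is not None and (best is None or r < best[0]):
--             best = (r, i)
--     if best is not None:
--         return best[1]
--     return min(1, len(feat_names) - 1)
-- ===== Notes on version B (the rewrite author's own statement) =====
-- stated objective: faster
-- what changed: A rescans the list once per priority key (four exact-match phases, then a heuristic phase); B assigns each name a priority rank once and selects the argmin (rank, index) in a single pass over the list.
import Mathlib
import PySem

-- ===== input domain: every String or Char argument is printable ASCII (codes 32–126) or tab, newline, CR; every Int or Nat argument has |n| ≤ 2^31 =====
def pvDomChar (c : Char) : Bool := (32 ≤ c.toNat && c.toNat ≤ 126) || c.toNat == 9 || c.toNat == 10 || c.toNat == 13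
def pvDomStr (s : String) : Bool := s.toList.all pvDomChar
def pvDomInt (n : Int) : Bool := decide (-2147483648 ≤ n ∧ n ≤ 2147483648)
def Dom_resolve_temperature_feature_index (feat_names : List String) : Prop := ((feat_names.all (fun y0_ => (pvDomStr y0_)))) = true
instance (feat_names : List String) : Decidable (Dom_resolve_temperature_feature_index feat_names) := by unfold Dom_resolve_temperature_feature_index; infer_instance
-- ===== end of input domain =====

-- B replaces A's per-key rescans by a one-pass argmin over a priority rank; equivalence of return values proved on all inputs.

-- ===== PORT A =====
-- inner loop 'for i, name in enumerate(feat_names): if name.strip().lower() == key.lower(): return i'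
def rtfiAFindKey (key : String) : List (Int × String) → Option Int
  | [] => none
  | (i, name) :: rest =>
    if PySem.Str.lower (PySem.Str.strip name) == PySem.Str.lower key then some i
    else rtfiAFindKey key rest

-- outer loop 'for key in (...)'
def rtfiAKeyLoop (feat_names : List String) : List String → Option Int
  | [] => none
  | k :: ks =>
    match rtfiAFindKey k (PySem.List.enumerate feat_names) with
    | some i => some i
    | none => rtfiAKeyLoop feat_names ks

-- second loop's condition on n = name.lower()
def rtfiAHeur (name : String) : Bool :=
  let n := PySem.Str.lower name
  PySem.Str.isIn "degc" n && !(PySem.Str.isIn "tlog" n) && !(PySem.Str.isIn "tpot" n)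
    && PySem.Str.startswith (PySem.Str.strip n) "t"

def rtfiAHeurLoop : List (Int × String) → Option Int
  | [] => none
  | (i, name) :: rest => if rtfiAHeur name then some i else rtfiAHeurLoop rest

def resolve_temperature_feature_index (feat_names : List String) : Int :=
  if feat_names.length == 1 then 0
  else
    match rtfiAKeyLoop feat_names ["T (degC)", "T(degC)", "temp", "temperature"] with
    | some i => i
    | none =>
      match rtfiAHeurLoop (PySem.List.enumerate feat_names) with
      | some i => i
      | none => min 1 ((feat_names.length : Int) - 1)

-- ===== PORT B =====
-- _rank from Source B
def rtfiRank (name : String) : Option Int :=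
  let s := PySem.Str.lower (PySem.Str.strip name)
  if s == "t (degc)" then some 0
  else if s == "t(degc)" then some 1
  else if s == "temp" then some 2
  else if s == "temperature" then some 3
  else
    let n := PySem.Str.lower name
    if PySem.Str.isIn "degc" n && !(PySem.Str.isIn "tlog" n) && !(PySem.Str.isIn "tpot" n)
        && PySem.Str.startswith (PySem.Str.strip n) "t" then some 4
    else none

-- loop body: keep best (rank, index), replace only on strictly smaller rank
def rtfiStep (best : Option (Int × Int)) (p : Int × String) : Option (Int × Int) :=
  match rtfiRank p.2 with
  | none => best
  | some r =>
    match best with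
    | none => some (r, p.1)
    | some b => if r < b.1 then some (r, p.1) else some b

def resolve_temperature_feature_index_alt (feat_names : List String) : Int :=
  match (PySem.List.enumerate feat_names).foldl rtfiStep none with
  | some b => b.2
  | none => min 1 ((feat_names.length : Int) - 1)

-- ===== PRECONDITION & SPEC =====
def Spec_resolve_temperature_feature_index (feat_names : List String) (out : Int) : Prop := out = resolve_temperature_feature_index_alt feat_names
instance (feat_names : List String) (out : Int) : Decidable (Spec_resolve_temperature_feature_index feat_names out) := by unfold Spec_resolve_temperature_feature_index; infer_instance

-- ===== CLAIM (what is proved, stated in full; the proofs are below) =====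
def Claim_equal_resolve_temperature_feature_index : Prop := ∀ (feat_names : List String), Dom_resolve_temperature_feature_index feat_names → Spec_resolve_temperature_feature_index feat_names (resolve_temperature_feature_index feat_names)

-- ===== LEMMAS AND PROOFS =====

-- proof-side: the normalized name
def rtfiNorm (name : String) : String := PySem.Str.lower (PySem.Str.strip name)

-- first index whose rank is exactly k
def rtfiFI (k : Int) (xs : List String) : Option Nat :=
  xs.findIdx? (fun n => rtfiRank n == some k)

-- chain normal form of the selection
def rtfiChain (xs : List String) : Option (Int × Nat) :=
  match rtfiFI 0 xs with
  | some j => some (0, j)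
  | none =>
    match rtfiFI 1 xs with
    | some j => some (1, j)
    | none =>
      match rtfiFI 2 xs with
      | some j => some (2, j)
      | none =>
        match rtfiFI 3 xs with
        | some j => some (3, j)
        | none =>
          match rtfiFI 4 xs with
          | some j => some (4, j)
          | none => none

-- front-recursion form of B's fold
def rtfiPick : List String → Option (Int × Nat)
  | [] => none
  | x :: xs =>
    match rtfiRank x, rtfiPick xs with
    | none, o => o.map (fun p => (p.1, p.2 + 1))
    | some r, none => some (r, 0)
    | some r, some p => if p.1 < r then some (p.1, p.2 + 1) else some (r, 0)

def rtfiMerge (b : Option (Int × Int)) (c : Option (Int × Int)) : Option (Int × Int) :=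
  match b, c with
  | b, none => b
  | none, c => c
  | some b, some c => if c.1 < b.1 then some c else some b

lemma rtfiRank_cases (n : String) :
    rtfiRank n = none ∨ rtfiRank n = some 0 ∨ rtfiRank n = some 1 ∨ rtfiRank n = some 2 ∨
      rtfiRank n = some 3 ∨ rtfiRank n = some 4 := by
  simp only [rtfiRank]
  split_ifs <;> simp

lemma rtfiFold_eq (xs : List String) : ∀ (s : Int) (best : Option (Int × Int)),
    (PySem.List.enumerate xs s).foldl rtfiStep best
      = rtfiMerge best ((rtfiPick xs).map (fun p => (p.1, s + (p.2 : Int)))) := by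
  induction xs with
  | nil => intro s best; cases best <;> simp [PySem.List.enumerate_nil, rtfiPick, rtfiMerge]
  | cons x xs ih =>
    intro s best
    rw [PySem.List.enumerate_cons, List.foldl_cons, ih]
    rcases rtfiRank_cases x with h | h | h | h | h | h <;>
      rcases hp : rtfiPick xs with _ | ⟨r, j⟩ <;>
      cases best <;>
      simp only [rtfiPick, rtfiStep, rtfiMerge, h, hp, Option.map_none, Option.map_some] <;>
      (try split_ifs) <;> (try simp_all) <;> (try split_ifs) <;> (try simp_all) <;> (try omega)

lemma rtfiPick_eq_chain (xs : List String) : rtfiPick xs = rtfiChain xs := by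
  induction xs with
  | nil => simp [rtfiPick, rtfiChain, rtfiFI]
  | cons x xs ih =>
    rcases rtfiRank_cases x with h | h | h | h | h | h <;>
      simp only [rtfiPick, rtfiChain, rtfiFI, List.findIdx?_cons, ih, h] <;>
      rcases h0 : List.findIdx? (fun n => rtfiRank n == some 0) xs with _ | j0 <;>
      rcases h1 : List.findIdx? (fun n => rtfiRank n == some 1) xs with _ | j1 <;>
      rcases h2 : List.findIdx? (fun n => rtfiRank n == some 2) xs with _ | j2 <;>
      rcases h3 : List.findIdx? (fun n => rtfiRank n == some 3) xs with _ | j3 <;>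
      rcases h4 : List.findIdx? (fun n => rtfiRank n == some 4) xs with _ | j4 <;>
      simp_all [rtfiChain, rtfiFI]

lemma rtfiAFindKey_eq (key : String) (xs : List String) : ∀ (s : Int),
    rtfiAFindKey key (PySem.List.enumerate xs s)
      = (xs.findIdx? (fun n => rtfiNorm n == PySem.Str.lower key)).map (fun j => s + (j : Int)) := by
  induction xs with
  | nil => intro s; simp [PySem.List.enumerate_nil, rtfiAFindKey]
  | cons x xs ih =>
    intro s
    rw [PySem.List.enumerate_cons]
    have hnorm : ∀ n, PySem.Str.lower (PySem.Str.strip n) = rtfiNorm n := fun _ => rfl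
    simp only [rtfiAFindKey, List.findIdx?_cons, hnorm]
    split_ifs with h
    · simp
    · rw [ih]
      rcases List.findIdx? (fun n => rtfiNorm n == PySem.Str.lower key) xs with _ | j
      · simp
      · simp; omega

lemma rtfiAHeurLoop_eq (xs : List String) : ∀ (s : Int),
    rtfiAHeurLoop (PySem.List.enumerate xs s)
      = (xs.findIdx? rtfiAHeur).map (fun j => s + (j : Int)) := by
  induction xs with
  | nil => intro s; simp [PySem.List.enumerate_nil, rtfiAHeurLoop]
  | cons x xs ih =>
    intro s
    rw [PySem.List.enumerate_cons]
    simp only [rtfiAHeurLoop, List.findIdx?_cons]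
    split_ifs with h
    · simp
    · rw [ih]
      rcases List.findIdx? rtfiAHeur xs with _ | j
      · simp
      · simp; omega

lemma rtfiRank0_iff (n : String) : (rtfiRank n == some 0) = (rtfiNorm n == "t (degc)") := by
  simp only [rtfiRank, rtfiNorm]; split_ifs <;> simp_all

lemma rtfiRank1_iff (n : String) : (rtfiRank n == some 1) = (rtfiNorm n == "t(degc)") := by
  simp only [rtfiRank, rtfiNorm]; split_ifs <;> simp_all

lemma rtfiRank2_iff (n : String) : (rtfiRank n == some 2) = (rtfiNorm n == "temp") := by
  simp only [rtfiRank, rtfiNorm]; split_ifs <;> simp_all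

lemma rtfiRank3_iff (n : String) : (rtfiRank n == some 3) = (rtfiNorm n == "temperature") := by
  simp only [rtfiRank, rtfiNorm]; split_ifs <;> simp_all

lemma rtfiRank4_iff (n : String)
    (h0 : (rtfiNorm n == "t (degc)") = false) (h1 : (rtfiNorm n == "t(degc)") = false)
    (h2 : (rtfiNorm n == "temp") = false) (h3 : (rtfiNorm n == "temperature") = false) :
    (rtfiRank n == some 4) = rtfiAHeur n := by
  simp only [rtfiRank, rtfiNorm, rtfiAHeur] at *
  split_ifs <;> simp_all

lemma rtfiFindIdx?_congr {α : Type} (p q : α → Bool) (xs : List α) (h : ∀ a ∈ xs, p a = q a) :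
    xs.findIdx? p = xs.findIdx? q := by
  induction xs with
  | nil => simp
  | cons x xs ih =>
    simp only [List.findIdx?_cons, h x (List.mem_cons_self), ih (fun a ha => h a (List.mem_cons_of_mem _ ha))]

-- ===== VERDICT (by name: the statement is the Claim_ definition above) =====
theorem resolve_temperature_feature_index_spec : Claim_equal_resolve_temperature_feature_index := by
  intro xs _
  unfold Spec_resolve_temperature_feature_index resolve_temperature_feature_index resolve_temperature_feature_index_alt
  rw [rtfiFold_eq, rtfiPick_eq_chain]
  have hk0 : PySem.Str.lower "T (degC)" = "t (degc)" := by decide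
  have hk1 : PySem.Str.lower "T(degC)" = "t(degc)" := by decide
  have hk2 : PySem.Str.lower "temp" = "temp" := by decide
  have hk3 : PySem.Str.lower "temperature" = "temperature" := by decide
  by_cases hlen : xs.length = 1
  · obtain ⟨x, hx⟩ := List.length_eq_one_iff.1 hlen
    subst hx
    rcases rtfiRank_cases x with h | h | h | h | h | h <;>
      simp [rtfiChain, rtfiFI, List.findIdx?_cons, h, rtfiMerge]
  · have hguard : (xs.length == 1) = false := by
      simpa using hlen
    rw [hguard]
    simp only [Bool.false_eq_true, if_false,
      rtfiAKeyLoop, rtfiAFindKey_eq, rtfiAHeurLoop_eq, hk0, hk1, hk2, hk3]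
    rw [show (fun n => rtfiNorm n == "t (degc)") = (fun n => rtfiRank n == some 0) from funext (fun n => (rtfiRank0_iff n).symm)]
    rw [show (fun n => rtfiNorm n == "t(degc)") = (fun n => rtfiRank n == some 1) from funext (fun n => (rtfiRank1_iff n).symm)]
    rw [show (fun n => rtfiNorm n == "temp") = (fun n => rtfiRank n == some 2) from funext (fun n => (rtfiRank2_iff n).symm)]
    rw [show (fun n => rtfiNorm n == "temperature") = (fun n => rtfiRank n == some 3) from funext (fun n => (rtfiRank3_iff n).symm)]
    rcases hfi0 : rtfiFI 0 xs with _ | j0 <;>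
    rcases hfi1 : rtfiFI 1 xs with _ | j1 <;>
    rcases hfi2 : rtfiFI 2 xs with _ | j2 <;>
    rcases hfi3 : rtfiFI 3 xs with _ | j3
    all_goals simp only [rtfiFI] at hfi0 hfi1 hfi2 hfi3
    all_goals simp only [rtfiChain, rtfiFI, hfi0, hfi1, hfi2, hfi3, Option.map_some, rtfiMerge]
    all_goals try simp
    -- remaining: the all-none case, heuristic phase
    have hcong : xs.findIdx? rtfiAHeur = xs.findIdx? (fun n => rtfiRank n == some 4) := by
      apply rtfiFindIdx?_congr
      intro a ha
      have e0 := (List.findIdx?_eq_none_iff.1 hfi0) a ha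
      have e1 := (List.findIdx?_eq_none_iff.1 hfi1) a ha
      have e2 := (List.findIdx?_eq_none_iff.1 hfi2) a ha
      have e3 := (List.findIdx?_eq_none_iff.1 hfi3) a ha
      rw [rtfiRank0_iff] at e0; rw [rtfiRank1_iff] at e1
      rw [rtfiRank2_iff] at e2; rw [rtfiRank3_iff] at e3
      exact (rtfiRank4_iff a e0 e1 e2 e3).symm
    rw [hcong]
    rcases List.findIdx? (fun n => rtfiRank n == some 4) xs with _ | j4 <;> simp
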